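-- pv_equiv track=rewrite | github.com/bradykim7/Algorithm | HackerRank/Problem_Solving/implementation/Manasa_And_Stone.py | stones
-- ===== SOURCE A (Python) =====
-- def stones(n, a, b):
--     ans=[]
--     for i in range(0,n):
--         if a*(n-1-i) + b*i in ans:
--             continue;
--         else :
--             ans.append(a*(n-1-i) + b*i)
--     ans.sort();
--     return ans;
-- ===== SOURCE B (Python) =====
-- def stones(n, a, b):
--     if n <= 0:
--         return []
--     if a == b:
--         return [a * (n - 1)]
--     lo, hi = (a, b) if a < b else (b, a)
--     d = hi - lo
--     base = lo * (n - 1)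
--     return [base + d * i for i in range(n)]
-- ===== Notes on version B (the rewrite author's own statement) =====
-- stated objective: faster
-- what changed: Replaces the quadratic membership-dedup loop plus final sort with a closed-form arithmetic progression: the reachable sums form an AP with step |b-a| starting at min(a,b)*(n-1), emitted directly in sorted order in one pass.
import Mathlib
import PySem

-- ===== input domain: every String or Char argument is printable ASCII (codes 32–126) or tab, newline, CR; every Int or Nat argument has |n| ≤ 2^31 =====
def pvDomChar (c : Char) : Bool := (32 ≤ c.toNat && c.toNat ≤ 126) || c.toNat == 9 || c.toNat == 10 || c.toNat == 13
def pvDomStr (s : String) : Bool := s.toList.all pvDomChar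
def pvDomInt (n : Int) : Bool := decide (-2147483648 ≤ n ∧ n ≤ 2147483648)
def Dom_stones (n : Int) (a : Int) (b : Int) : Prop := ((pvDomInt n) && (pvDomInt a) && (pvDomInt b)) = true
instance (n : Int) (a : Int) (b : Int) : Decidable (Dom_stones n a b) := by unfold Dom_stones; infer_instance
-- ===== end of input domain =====

-- B replaces A's O(n^2) membership-dedup loop plus sort with a closed-form arithmetic
-- progression emitted directly in sorted order (objective: faster, O(n)).

-- ===== PORT A =====
def stones (n : Int) (a : Int) (b : Int) : List Int :=
  let ans := (PySem.List.pyRange 0 n 1).foldl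
    (fun ans i => if a * (n - 1 - i) + b * i ∈ ans then ans else ans ++ [a * (n - 1 - i) + b * i]) []
  PySem.List.sorted ans (fun x => x) false

-- ===== PORT B =====
def stones_alt (n : Int) (a : Int) (b : Int) : List Int :=
  if n ≤ 0 then []
  else if a = b then [a * (n - 1)]
  else
    let lo := if a < b then a else b
    let hi := if a < b then b else a
    let d := hi - lo
    let base := lo * (n - 1)
    (PySem.List.pyRange 0 n 1).map (fun i => base + d * i)

-- ===== PRECONDITION & SPEC =====
def Spec_stones (n : Int) (a : Int) (b : Int) (out : List Int) : Prop := out = stones_alt n a b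
instance (n : Int) (a : Int) (b : Int) (out : List Int) : Decidable (Spec_stones n a b out) := by unfold Spec_stones; infer_instance

-- ===== CLAIM (what is proved, stated in full; the proofs are below) =====
def Claim_equal_stones : Prop := ∀ (n : Int) (a : Int) (b : Int), Dom_stones n a b → Spec_stones n a b (stones n a b)

-- ===== LEMMAS AND PROOFS =====

-- dedup-append fold over already-present values is a no-op
theorem pv_foldl_mem (v : Int → Int) : ∀ (l acc : List Int), (∀ i ∈ l, v i ∈ acc) →
    l.foldl (fun ans i => if v i ∈ ans then ans else ans ++ [v i]) acc = acc := by
  intro l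
  induction l with
  | nil => intro acc _; rfl
  | cons i t ih =>
    intro acc h
    simp only [List.foldl_cons, if_pos (h i (List.mem_cons_self))]
    exact ih acc (fun j hj => h j (List.mem_cons_of_mem _ hj))

-- dedup-append fold over fresh, pairwise-distinct values appends them all
theorem pv_foldl_fresh (v : Int → Int) : ∀ (l acc : List Int),
    (∀ i ∈ l, v i ∉ acc) → (l.map v).Nodup →
    l.foldl (fun ans i => if v i ∈ ans then ans else ans ++ [v i]) acc = acc ++ l.map v := by
  intro l
  induction l with
  | nil => intro acc _ _; simp
  | cons i t ih =>
    intro acc h hnd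
    simp only [List.map_cons, List.nodup_cons] at hnd
    simp only [List.foldl_cons, if_neg (h i (List.mem_cons_self))]
    rw [ih (acc ++ [v i])]
    · simp
    · intro j hj hmem
      rcases List.mem_append.1 hmem with h1 | h1
      · exact h j (List.mem_cons_of_mem _ hj) h1
      · have heq : v j = v i := List.mem_singleton.1 h1
        exact hnd.1 (heq ▸ List.mem_map_of_mem hj)
    · exact hnd.2

theorem pv_v_inj (n a b : Int) (hab : a ≠ b) :
    Function.Injective (fun i : Int => a * (n - 1 - i) + b * i) := by
  intro i j h
  simp only at h
  have : (b - a) * i = (b - a) * j := by ring_nf; ring_nf at h; linarith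
  have hba : b - a ≠ 0 := sub_ne_zero.2 (Ne.symm hab)
  exact mul_left_cancel₀ hba this

-- ===== VERDICT (by name: the statement is the Claim_ definition above) =====
theorem stones_spec : Claim_equal_stones := by
  intro n a b _
  unfold Spec_stones stones stones_alt
  by_cases hn : n ≤ 0
  · rw [PySem.List.pyRange_one_eq_nil (by simpa using hn)]
    simp only [List.foldl_nil, if_pos hn]
    exact PySem.List.sorted_eq_self_of_pairwise _ _ List.Pairwise.nil
  · rw [not_le] at hn
    rw [if_neg (by omega)]
    set v : Int → Int := fun i => a * (n - 1 - i) + b * i with hv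
    by_cases hab : a = b
    · -- all values equal a*(n-1)
      rw [if_pos hab]
      rw [PySem.List.pyRange_one_cons hn]
      simp only [List.foldl_cons]
      have h0 : v 0 = a * (n - 1) := by simp [hv]
      rw [if_neg (by simp), List.nil_append]
      rw [pv_foldl_mem v _ [v 0] (by
        intro i _
        subst hab
        simp only [hv, List.mem_singleton]
        ring)]
      rw [h0]
      exact PySem.List.sorted_eq_self_of_pairwise _ _ (List.pairwise_singleton _ _)
    · rw [if_neg hab]
      have hfold : (PySem.List.pyRange 0 n 1).foldl
          (fun ans i => if v i ∈ ans then ans else ans ++ [v i]) [] =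
          (PySem.List.pyRange 0 n 1).map v := by
        rw [pv_foldl_fresh v _ [] (by simp)
          (List.Nodup.map (pv_v_inj n a b hab) (PySem.List.nodup_pyRange_one 0 n))]
        simp
      rw [hfold]
      have hrange : PySem.List.pyRange 0 n 1 = (List.range n.toNat).map (fun k : Nat => (k : Int)) := by
        rw [PySem.List.pyRange_one]
        simp
      by_cases hlt : a < b
      · -- v is strictly increasing on the range: B's list IS map v range
        simp only [if_pos hlt]
        have heq : (PySem.List.pyRange 0 n 1).map (fun i => a * (n - 1) + (b - a) * i)
            = (PySem.List.pyRange 0 n 1).map v := by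
          apply List.map_congr_left
          intro i _
          simp only [hv]; ring
        rw [← heq]
        apply PySem.List.sorted_eq_of_perm_of_pairwise_lt
        · rw [heq]
        · exact List.Pairwise.map _
            (fun i j (h : i < j) => by nlinarith [sub_pos.2 hlt])
            (PySem.List.pairwise_lt_pyRange_one 0 n)
      · -- b < a: B's list is the reverse of map v range
        have hba : b < a := by omega
        simp only [if_neg hlt]
        have hrev : (PySem.List.pyRange 0 n 1).map (fun i => b * (n - 1) + (a - b) * i)
            = ((PySem.List.pyRange 0 n 1).map v).reverse := by
          have hrevrange : (PySem.List.pyRange 0 n 1).reverse = PySem.List.pyRange (n - 1) (-1) (-1) := by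
            have h := PySem.List.pyRange_neg_one_eq_reverse (n - 1) (-1)
            rw [h]; norm_num
          rw [← List.map_reverse, hrevrange]
          · rw [PySem.List.pyRange_neg_one, hrange]
            simp only [List.map_map]
            have hlen : (n - 1 - -1).toNat = n.toNat := by omega
            rw [hlen]
            apply List.map_congr_left
            intro k _
            simp only [Function.comp, hv]
            ring
        rw [hrev]
        apply PySem.List.sorted_eq_of_perm_of_pairwise_lt
        · exact (List.reverse_perm _)
        · rw [← hrev]
          exact List.Pairwise.map _
            (fun i j (h : i < j) => by nlinarith [sub_pos.2 hba])
            (PySem.List.pairwise_lt_pyRange_one 0 n)
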